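-- pv_equiv track=rewrite | github.com/AlexTuisov/HW2 | HW2_submission/49_submission/ex2.py | update_observations
-- ===== SOURCE A (Python) =====
-- def update_observations(map, num_turns):
--     # List of tuples of tuples to list of list of list
--     updated_map = []
--     for obs in map:
--         obs_updated = []
--         for row in obs:
--             row_updated = []
--             for cell_type in row:
--                 row_updated.append(cell_type)
--             obs_updated.append(row_updated)
--         updated_map.append(obs_updated)
--
--     for turn, obs in enumerate(map):
--         for i, row in enumerate(obs):
--             for j, cell_type in enumerate(row):
--                 if cell_type == "I":
--                     for inner_turn in range(turn + 1, num_turns):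
--                         updated_map[inner_turn][i][j] = cell_type
--
--                 if cell_type == "U":
--                     for inner_turn in range(turn + 1, num_turns):
--                         updated_map[inner_turn][i][j] = cell_type
--                     for inner_turn in range(turn, -1, -1):
--                         updated_map[inner_turn][i][j] = cell_type
--
--                 if cell_type == 'Q' and turn + 1 < num_turns and turn > 0:
--                     if map[turn - 1][i][j] not in '?Q':
--                         updated_map[turn + 1][i][j] = 'Q'
--                     if map[turn + 1][i][j] not in '?Q':
--                         updated_map[turn - 1][i][j] = 'Q'
--     return updated_map
-- ===== SOURCE B (Python) =====
-- # B: target-centric rewrite -- for each cell (t,i,j) scan source turns from last to first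
-- # and return the first (= latest, last-writer-wins) value that source would write there.
-- SUBS = ("", "?", "Q", "?Q")  # exactly the substrings of "?Q"
--
-- def _cell(map, s, i, j):
--     """map[s][i][j], or None when that cell does not exist."""
--     if 0 <= s < len(map):
--         obs = map[s]
--         if i < len(obs) and j < len(obs[i]):
--             return obs[i][j]
--     return None
--
-- def _writer(map, num_turns, s, t, i, j):
--     """Value that source turn s writes into target turn t at cell (i, j), or None."""
--     v = _cell(map, s, i, j)
--     if v == "U":
--         if t <= s or (s < t and t < num_turns):
--             return "U"
--     elif v == "I":
--         if s < t and t < num_turns: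
--             return "I"
--     elif v == "Q" and s > 0 and s + 1 < num_turns:
--         if t == s + 1:
--             c = _cell(map, s - 1, i, j)
--             if c is not None and c not in SUBS:
--                 return "Q"
--         if t == s - 1:
--             c = _cell(map, s + 1, i, j)
--             if c is not None and c not in SUBS:
--                 return "Q"
--     return None
--
-- def update_observations(map, num_turns):
--     T = len(map)
--     out = []
--     for t, obs in enumerate(map):
--         new_obs = []
--         for i, row in enumerate(obs):
--             new_row = []
--             for j, cell in enumerate(row):
--                 val = cell
--                 for s in range(T - 1, -1, -1):
--                     w = _writer(map, num_turns, s, t, i, j)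
--                     if w is not None:
--                         val = w
--                         break
--                 new_row.append(val)
--             new_obs.append(new_row)
--         out.append(new_obs)
--     return out
-- ===== Notes on version B (the rewrite author's own statement) =====
-- stated objective: alternative
-- what changed: A deep-copies the map and, per source turn, repeatedly overwrites whole ranges of later/earlier turns in the mutable copy; B never mutates: for each target cell (t,i,j) it scans source turns from last to first and returns the first (= latest, last-writer-wins) value that source would write there, with an early exit, so the repeated range rewrites disappear.
import Mathlib
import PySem

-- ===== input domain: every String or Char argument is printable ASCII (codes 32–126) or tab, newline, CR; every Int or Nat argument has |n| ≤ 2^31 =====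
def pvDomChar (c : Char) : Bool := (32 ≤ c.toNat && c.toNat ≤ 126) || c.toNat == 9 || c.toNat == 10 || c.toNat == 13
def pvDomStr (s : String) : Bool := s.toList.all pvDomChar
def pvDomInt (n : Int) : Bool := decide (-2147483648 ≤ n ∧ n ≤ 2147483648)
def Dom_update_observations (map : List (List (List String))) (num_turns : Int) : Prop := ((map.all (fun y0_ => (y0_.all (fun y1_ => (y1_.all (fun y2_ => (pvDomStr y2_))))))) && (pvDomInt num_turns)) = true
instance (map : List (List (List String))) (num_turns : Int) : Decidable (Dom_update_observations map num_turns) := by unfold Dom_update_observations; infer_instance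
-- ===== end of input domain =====

-- B is a target-centric rewrite of A (per-cell last-writer query instead of in-place
-- region overwrites on a mutable copy); equivalence is about the return value only
-- (neither program mutates its argument).

-- shared indexing helper: m[t][i][j] read with a default (all reads the ports make
-- with it are in range under Pre_)
def getN (m : List (List (List String))) (t i j : Nat) : String :=
  ((m.getD t []).getD i []).getD j ""

-- ===== PORT A =====
-- updated_map[t][i][j] = v  (in range under Pre_; out-of-range set is a no-op)
def setN (m : List (List (List String))) (t i j : Nat) (v : String) : List (List (List String)) :=
  m.set t ((m.getD t []).set i (((m.getD t []).getD i []).set j v))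

-- for inner_turn in range(a, b): updated[inner_turn][i][j] = v
def writeRange (m : List (List (List String))) (a b : Int) (i j : Nat) (v : String) : List (List (List String)) :=
  (PySem.List.pyRange a b 1).foldl (fun acc k => setN acc k.toNat i j v) m

-- for inner_turn in range(turn, -1, -1): updated[inner_turn][i][j] = v
def writeDown (m : List (List (List String))) (turn : Nat) (i j : Nat) (v : String) : List (List (List String)) :=
  (PySem.List.pyRange (turn : Int) (-1) (-1)).foldl (fun acc k => setN acc k.toNat i j v) m

-- the body of A's innermost loop (one cell of one source turn)
def stepCell (map : List (List (List String))) (num_turns : Int) (turn i j : Nat) (cell : String)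
    (m : List (List (List String))) : List (List (List String)) :=
  let m1 := if cell = "I" then writeRange m ((turn : Int)+1) num_turns i j cell else m
  let m2 := if cell = "U" then writeDown (writeRange m1 ((turn : Int)+1) num_turns i j cell) turn i j cell else m1
  if cell = "Q" ∧ (turn : Int)+1 < num_turns ∧ 0 < turn then
    let m3 := if ¬ (PySem.Str.isIn (getN map (turn-1) i j) "?Q") then setN m2 (turn+1) i j "Q" else m2
    if ¬ (PySem.Str.isIn (getN map (turn+1) i j) "?Q") then setN m3 (turn-1) i j "Q" else m3
  else m2

def update_observations (map : List (List (List String))) (num_turns : Int) : List (List (List String)) :=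
  let updated := map.map (fun obs => obs.map (fun row => row.map (fun c => c)))
  (map.zipIdx).foldl (fun m po =>
    (po.1.zipIdx).foldl (fun m pr =>
      (pr.1.zipIdx).foldl (fun m pc =>
        stepCell map num_turns po.2 pr.2 pc.2 pc.1 m) m) m) updated

-- ===== PORT B =====
-- exactly the substrings of "?Q" (Source B's SUBS tuple)
def subsQ : List String := ["", "?", "Q", "?Q"]

-- Source B's _cell: map[s][i][j], or none when that cell does not exist
def cellQ (map : List (List (List String))) (s i j : Nat) : Option String :=
  if s < map.length ∧ i < (map.getD s []).length ∧ j < ((map.getD s []).getD i []).length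
  then some (getN map s i j) else none

-- Source B's `c is not None and c not in SUBS`
def qok (o : Option String) : Bool :=
  o.elim false (fun c => !(subsQ.contains c))

-- Source B's _writer: the value source turn s writes into target turn t at cell (i, j)
def writerW (map : List (List (List String))) (num_turns : Int) (s t i j : Nat) : Option String :=
  let v := cellQ map s i j
  if v = some "U" then
    if t ≤ s ∨ (s < t ∧ (t : Int) < num_turns) then some "U" else none
  else if v = some "I" then
    if s < t ∧ (t : Int) < num_turns then some "I" else none
  else if v = some "Q" ∧ 0 < s ∧ (s : Int)+1 < num_turns then
    if t = s + 1 ∧ qok (cellQ map (s-1) i j) then some "Q"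
    else if t = s - 1 ∧ qok (cellQ map (s+1) i j) then some "Q"
    else none
  else none

-- Source B's inner loop: scan sources s = fuel-1, …, 0 and stop at the first writer
def scanW (map : List (List (List String))) (num_turns : Int) (t i j : Nat) : Nat → Option String
  | 0 => none
  | s+1 =>
    match writerW map num_turns s t i j with
    | some w => some w
    | none => scanW map num_turns t i j s

def update_observations_alt (map : List (List (List String))) (num_turns : Int) : List (List (List String)) :=
  (map.zipIdx).map (fun po =>
    (po.1.zipIdx).map (fun pr =>
      (pr.1.zipIdx).map (fun pc =>
        (scanW map num_turns po.2 pr.2 pc.2 map.length).getD pc.1)))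

-- ===== PRECONDITION & SPEC =====
-- Pre_ is exactly the closed-form condition under which A raises no IndexError: every
-- write/read an I/U/Q cell triggers must land inside the turn grids (in particular an
-- I/U cell forces num_turns ≤ len(map) when its forward range is non-empty).
def inGrid (map : List (List (List String))) (u i j : Nat) : Bool :=
  decide (i < (map.getD u []).length) && decide (j < ((map.getD u []).getD i []).length)

-- A raises nothing iff every write/read that an I/U/Q cell triggers lands inside the
-- turn grids (an I/U cell with a non-empty forward range forces num_turns ≤ len(map)).
def preOK (map : List (List (List String))) (num_turns : Int) : Bool :=
  (List.range map.length).all fun s =>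
    (List.range (map.getD s []).length).all fun i =>
      (List.range ((map.getD s []).getD i []).length).all fun j =>
        -- forward writes of an "I" or "U" cell
        ((!(getN map s i j == "I" || getN map s i j == "U")) ||
          ((!decide ((s : Int)+1 < num_turns) || decide (num_turns ≤ (map.length : Int))) &&
            (List.range map.length).all fun u =>
              !(decide (s+1 ≤ u) && decide ((u : Int) < num_turns)) || inGrid map u i j)) &&
        -- backward writes of a "U" cell
        ((!(getN map s i j == "U")) ||
          (List.range (s+1)).all fun u => inGrid map u i j) &&
        -- neighbour reads/writes of a triggered "Q" cell
        ((!(getN map s i j == "Q" && decide ((s : Int)+1 < num_turns) && decide (0 < s))) ||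
          (inGrid map (s-1) i j && decide (s+1 < map.length) && inGrid map (s+1) i j))

def Pre_update_observations (map : List (List (List String))) (num_turns : Int) : Prop :=
  preOK map num_turns = true

instance (map : List (List (List String))) (num_turns : Int) : Decidable (Pre_update_observations map num_turns) := by
  unfold Pre_update_observations; infer_instance

def pvWitness_update_observations : List (List (List String)) × Int :=
  ([[["I", "?"], ["x"]], [["?", "U"], ["Q"]], [["?", "?"], ["?"]]], 3)

def Spec_update_observations (map : List (List (List String))) (num_turns : Int) (out : List (List (List String))) : Prop := out = update_observations_alt map num_turns
instance (map : List (List (List String))) (num_turns : Int) (out : List (List (List String))) : Decidable (Spec_update_observations map num_turns out) := by unfold Spec_update_observations; infer_instance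

-- ===== CLAIM (what is proved, stated in full; the proofs are below) =====
def Claim_equal_update_observations : Prop := ∀ (map : List (List (List String))) (num_turns : Int), Dom_update_observations map num_turns → Pre_update_observations map num_turns → Spec_update_observations map num_turns (update_observations map num_turns)


-- ===== LEMMAS AND PROOFS =====

theorem getD_set {α : Type} (l : List α) (n k : Nat) (x d : α) :
    (l.set n x).getD k d = if k = n ∧ n < l.length then x else l.getD k d := by
  simp [List.getD_eq_getElem?_getD, List.getElem?_set]
  split_ifs with h1 h2 h3 <;> simp_all

theorem getN_setN (m : List (List (List String))) (t i j t' i' j' : Nat) (v : String) :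
    getN (setN m t i j v) t' i' j' =
      if t' = t ∧ i' = i ∧ j' = j ∧ t < m.length ∧ i < (m.getD t []).length ∧ j < ((m.getD t []).getD i []).length
      then v else getN m t' i' j' := by
  unfold getN setN
  rw [getD_set]
  by_cases h1 : t' = t ∧ t < m.length
  · obtain ⟨rfl, _⟩ := h1
    rw [if_pos (by tauto), getD_set]
    by_cases h2 : i' = i ∧ i < (m.getD t' []).length
    · obtain ⟨rfl, _⟩ := h2
      rw [if_pos (by tauto), getD_set]
      by_cases h3 : j' = j ∧ j < ((m.getD t' []).getD i' []).length
      · obtain ⟨rfl, _⟩ := h3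
        rw [if_pos (by tauto), if_pos (by tauto)]
      · rw [if_neg h3, if_neg (by tauto)]
    · rw [if_neg h2, if_neg (by tauto)]
  · rw [if_neg h1, if_neg (by tauto)]

def shapeOk (m map : List (List (List String))) : Prop :=
  m.length = map.length ∧
  (∀ t, (m.getD t []).length = (map.getD t []).length) ∧
  (∀ t i, ((m.getD t []).getD i []).length = ((map.getD t []).getD i []).length)

theorem shapeOk_refl (map : List (List (List String))) : shapeOk map map :=
  ⟨rfl, fun _ => rfl, fun _ _ => rfl⟩

theorem shapeOk_setN (m map : List (List (List String))) (t i j : Nat) (v : String)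
    (h : shapeOk m map) : shapeOk (setN m t i j v) map := by
  obtain ⟨h1, h2, h3⟩ := h
  refine ⟨by simp [setN, h1], fun t' => ?_, fun t' i' => ?_⟩
  · simp only [setN]
    rw [getD_set]
    split_ifs with hc
    · obtain ⟨rfl, _⟩ := hc
      rw [List.length_set]
      exact h2 t'
    · exact h2 t'
  · simp only [setN]
    rw [getD_set]
    split_ifs with hc
    · obtain ⟨rfl, _⟩ := hc
      rw [getD_set]
      split_ifs with hc2
      · obtain ⟨rfl, _⟩ := hc2
        rw [List.length_set]
        exact h3 t' i'
      · exact h3 t' i'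
    · exact h3 t' i'

theorem shapeOk_wfold (map m : List (List (List String))) (L : List Int) (i j : Nat) (v : String)
    (hsh : shapeOk m map) :
    shapeOk (L.foldl (fun acc k => setN acc k.toNat i j v) m) map := by
  induction L generalizing m with
  | nil => exact hsh
  | cons k L ih => exact ih _ (shapeOk_setN _ _ _ _ _ _ hsh)

theorem getN_wfold (map m : List (List (List String))) (L : List Int) (i j t' i' j' : Nat) (v : String)
    (hL : ∀ k ∈ L, 0 ≤ k) (hsh : shapeOk m map)
    (ht' : t' < map.length) (hi' : i' < (map.getD t' []).length)
    (hj' : j' < ((map.getD t' []).getD i' []).length) :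
    getN (L.foldl (fun acc k => setN acc k.toNat i j v) m) t' i' j' =
      if ((t' : Int) ∈ L ∧ i' = i ∧ j' = j) then v else getN m t' i' j' := by
  induction L generalizing m with
  | nil => simp
  | cons k L ih =>
    obtain ⟨hm1, hm2, hm3⟩ := hsh
    have hk : 0 ≤ k := hL k (by simp)
    rw [List.foldl_cons, ih _ (fun x hx => hL x (List.mem_cons_of_mem _ hx)) (shapeOk_setN _ _ _ _ _ _ ⟨hm1, hm2, hm3⟩)]
    rw [getN_setN]
    by_cases hrest : (t' : Int) ∈ L ∧ i' = i ∧ j' = j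
    · rw [if_pos hrest, if_pos ⟨by simp [hrest.1], hrest.2⟩]
    · rw [if_neg hrest]
      by_cases hhead : (t' : Int) = k ∧ i' = i ∧ j' = j
      · obtain ⟨hk1, rfl, rfl⟩ := hhead
        have htn : k.toNat = t' := by omega
        have hin : t' = k.toNat ∧ i' = i' ∧ j' = j' ∧ k.toNat < m.length ∧
            i' < (m.getD k.toNat []).length ∧ j' < ((m.getD k.toNat []).getD i' []).length := by
          refine ⟨by omega, rfl, rfl, by omega, ?_, ?_⟩
          · rw [htn, hm2 t']; exact hi'
          · rw [htn, hm3 t' i']; exact hj'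
        rw [if_pos hin, if_pos ⟨by simp [← hk1], rfl, rfl⟩]
      · have hB : ¬ (t' = k.toNat ∧ i' = i ∧ j' = j ∧ k.toNat < m.length ∧
            i < (m.getD k.toNat []).length ∧ j < ((m.getD k.toNat []).getD i []).length) := by
          intro ⟨ha, hb, hc, _⟩
          exact hhead ⟨by omega, hb, hc⟩
        have hC : ¬ ((t' : Int) ∈ k :: L ∧ i' = i ∧ j' = j) := by
          intro ⟨ha, hb, hc⟩
          rcases List.mem_cons.mp ha with ha | ha
          · exact hhead ⟨ha, hb, hc⟩
          · exact hrest ⟨ha, hb, hc⟩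
        rw [if_neg hB, if_neg hC]

theorem infixQ (l : List Char) : l <:+: ['?','Q'] ↔ l = [] ∨ l = ['?'] ∨ l = ['Q'] ∨ l = ['?','Q'] := by
  constructor
  · rintro ⟨s, t, h⟩
    rcases s with _|⟨a, _|⟨b, s⟩⟩ <;> rcases l with _|⟨x, _|⟨y, l⟩⟩ <;> simp_all
  · rintro (rfl|rfl|rfl|rfl) <;> decide

theorem toList_eq_str (v : String) (l : List Char) : v.toList = l ↔ v = String.ofList l := by
  constructor
  · intro h; have := congrArg String.ofList h; simpa using this
  · intro h; subst h; simp

-- A's substring test `x in "?Q"` agrees with B's membership in subsQ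
theorem isInQ (v : String) : PySem.Str.isIn v "?Q" = subsQ.contains v := by
  rw [Bool.eq_iff_iff, PySem.Str.isIn_iff_infix, subsQ, List.contains_iff_mem]
  rw [show "?Q".toList = ['?', 'Q'] by decide, infixQ]
  simp only [toList_eq_str]
  constructor
  · rintro (h|h|h|h) <;> subst h <;> simp
  · intro h
    simp only [List.mem_cons, List.not_mem_nil, or_false] at h
    rcases h with h|h|h|h <;> subst h <;> decide

theorem getN_oob (map : List (List (List String))) (s i j : Nat)
    (h : ¬ (s < map.length ∧ i < (map.getD s []).length ∧ j < ((map.getD s []).getD i []).length)) :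
    getN map s i j = "" := by
  unfold getN
  by_cases h1 : s < map.length
  · by_cases h2 : i < (map.getD s []).length
    · have h3 : ((map.getD s []).getD i []).length ≤ j := by
        rcases Nat.lt_or_ge j ((map.getD s []).getD i []).length with hlt | hge
        · exact absurd ⟨h1, h2, hlt⟩ h
        · exact hge
      exact List.getD_eq_default _ _ h3
    · have e : (map.getD s []).getD i [] = [] := List.getD_eq_default _ _ (by omega)
      rw [e]
      rfl
  · have e : map.getD s [] = [] := List.getD_eq_default _ _ (by omega)
    rw [e]
    rfl

theorem cellQ_in (map : List (List (List String))) (s i j : Nat)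
    (hs : s < map.length) (hi : i < (map.getD s []).length)
    (hj : j < ((map.getD s []).getD i []).length) :
    cellQ map s i j = some (getN map s i j) := by
  unfold cellQ
  rw [if_pos ⟨hs, hi, hj⟩]

theorem cellQ_oob (map : List (List (List String))) (s i j : Nat)
    (h : ¬ (s < map.length ∧ i < (map.getD s []).length ∧ j < ((map.getD s []).getD i []).length)) :
    cellQ map s i j = none := by
  unfold cellQ
  rw [if_neg h]

theorem writerW_oob (map : List (List (List String))) (nt : Int) (s t i j : Nat)
    (h : ¬ (s < map.length ∧ i < (map.getD s []).length ∧ j < ((map.getD s []).getD i []).length)) :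
    writerW map nt s t i j = none := by
  unfold writerW
  rw [cellQ_oob map s i j h]
  rw [if_neg (by decide), if_neg (by decide), if_neg (fun hc => by exact absurd hc.1 (by decide))]

-- the B-side neighbour test agrees with A's substring test, including absent cells
theorem qok_iff (map : List (List (List String))) (s i j : Nat) :
    (qok (cellQ map s i j) = true) ↔ ¬ (subsQ.contains (getN map s i j) = true) := by
  by_cases h : s < map.length ∧ i < (map.getD s []).length ∧ j < ((map.getD s []).getD i []).length
  · rw [cellQ_in map s i j h.1 h.2.1 h.2.2]
    simp [qok]
  · rw [cellQ_oob map s i j h, getN_oob map s i j h]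
    simp [qok]
    decide

theorem shapeOk_stepCell (map m : List (List (List String))) (nt : Int) (turn i j : Nat) (cell : String)
    (hsh : shapeOk m map) : shapeOk (stepCell map nt turn i j cell m) map := by
  unfold stepCell writeRange writeDown
  split_ifs <;>
    first
      | exact hsh
      | (repeat first | apply shapeOk_setN | apply shapeOk_wfold) <;> exact hsh

theorem getN_stepCell (map m : List (List (List String))) (nt : Int) (turn i j t' i' j' : Nat)
    (cell : String) (hcell : cell = getN map turn i j)
    (hsh : shapeOk m map)
    (hsrc_t : turn < map.length) (hsrc_i : i < (map.getD turn []).length)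
    (hsrc_j : j < ((map.getD turn []).getD i []).length)
    (ht' : t' < map.length) (hi' : i' < (map.getD t' []).length)
    (hj' : j' < ((map.getD t' []).getD i' []).length) :
    getN (stepCell map nt turn i j cell m) t' i' j' =
      if i' = i ∧ j' = j then (writerW map nt turn t' i j).getD (getN m t' i' j')
      else getN m t' i' j' := by
  subst hcell
  have hm1 := hsh.1
  have hm2 := hsh.2.1
  have hm3 := hsh.2.2
  have e1 : ((t' : Int) ∈ PySem.List.pyRange (turn : Int) (-1) (-1)) ↔ t' ≤ turn := by
    rw [PySem.List.mem_pyRange_neg_one]; omega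
  have e2 : ((t' : Int) ∈ PySem.List.pyRange ((turn : Int)+1) nt 1) ↔ (turn < t' ∧ (t' : Int) < nt) := by
    rw [PySem.List.mem_pyRange_one]; omega
  have hL1 : ∀ k ∈ PySem.List.pyRange (turn : Int) (-1) (-1), (0:Int) ≤ k := by
    intro k hk; rw [PySem.List.mem_pyRange_neg_one] at hk; omega
  have hL2 : ∀ k ∈ PySem.List.pyRange ((turn : Int)+1) nt 1, (0:Int) ≤ k := by
    intro k hk; rw [PySem.List.mem_pyRange_one] at hk; omega
  have hv : cellQ map turn i j = some (getN map turn i j) :=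
    cellQ_in map turn i j hsrc_t hsrc_i hsrc_j
  unfold stepCell writerW
  simp only [hv, Option.some.injEq]
  by_cases hU : getN map turn i j = "U"
  · have hI : ¬ (getN map turn i j = "I") := by rw [hU]; decide
    have hQ : ¬ (getN map turn i j = "Q" ∧ ((turn : Int)+1 < nt) ∧ 0 < turn) := by
      rw [hU]; rintro ⟨h, -⟩; exact absurd h (by decide)
    simp only [if_neg hI, if_pos hU, if_neg hQ]
    unfold writeDown writeRange
    rw [getN_wfold map _ _ _ _ _ _ _ _ hL1 (shapeOk_wfold map m _ i j _ hsh) ht' hi' hj']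
    rw [getN_wfold map _ _ _ _ _ _ _ _ hL2 hsh ht' hi' hj']
    by_cases heq : i' = i ∧ j' = j
    · obtain ⟨rfl, rfl⟩ := heq
      by_cases h1 : t' ≤ turn
      · rw [if_pos ⟨e1.mpr h1, rfl, rfl⟩, if_pos ⟨rfl, rfl⟩, if_pos (Or.inl h1), hU,
          Option.getD_some]
      · rw [if_neg (fun h => h1 (e1.mp h.1))]
        by_cases h2 : turn < t' ∧ (t' : Int) < nt
        · rw [if_pos ⟨e2.mpr h2, rfl, rfl⟩, if_pos ⟨rfl, rfl⟩, if_pos (Or.inr h2), hU,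
            Option.getD_some]
        · rw [if_neg (fun h => h2 (e2.mp h.1)), if_pos ⟨rfl, rfl⟩, if_neg (by tauto),
            Option.getD_none]
    · rw [if_neg (fun h => heq ⟨h.2.1, h.2.2⟩), if_neg (fun h => heq ⟨h.2.1, h.2.2⟩),
        if_neg heq]
  · by_cases hI : getN map turn i j = "I"
    · have hQ : ¬ (getN map turn i j = "Q" ∧ ((turn : Int)+1 < nt) ∧ 0 < turn) := by
        rw [hI]; rintro ⟨h, -⟩; exact absurd h (by decide)
      simp only [if_pos hI, if_neg hU, if_neg hQ]
      unfold writeRange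
      rw [getN_wfold map _ _ _ _ _ _ _ _ hL2 hsh ht' hi' hj']
      by_cases heq : i' = i ∧ j' = j
      · obtain ⟨rfl, rfl⟩ := heq
        by_cases h2 : turn < t' ∧ (t' : Int) < nt
        · rw [if_pos ⟨e2.mpr h2, rfl, rfl⟩, if_pos ⟨rfl, rfl⟩, if_pos h2, hI, Option.getD_some]
        · rw [if_neg (fun h => h2 (e2.mp h.1)), if_pos ⟨rfl, rfl⟩, if_neg h2, Option.getD_none]
      · rw [if_neg (fun h => heq ⟨h.2.1, h.2.2⟩), if_neg heq]
    · simp only [if_neg hI, if_neg hU]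
      by_cases hC : getN map turn i j = "Q" ∧ ((turn : Int)+1 < nt) ∧ 0 < turn
      · have hC' : getN map turn i j = "Q" ∧ 0 < turn ∧ ((turn : Int)+1 < nt) :=
          ⟨hC.1, hC.2.2, hC.2.1⟩
        simp only [if_pos hC, if_pos hC']
        have hturn : 0 < turn := hC.2.2
        simp only [isInQ, qok_iff]
        have hs2 := shapeOk_setN m map (turn+1) i j "Q" hsh
        by_cases heq : i' = i ∧ j' = j
        · obtain ⟨rfl, rfl⟩ := heq
          by_cases c1 : subsQ.contains (getN map (turn-1) i' j') = true <;>
            by_cases c2 : subsQ.contains (getN map (turn+1) i' j') = true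
          · -- no writes
            rw [if_neg (fun h => h c2), if_neg (fun h => h c1), if_pos ⟨rfl, rfl⟩,
              if_neg (fun h => h.2 c1), if_neg (fun h => h.2 c2), Option.getD_none]
          · -- write at turn-1 only
            rw [if_pos c2, if_neg (fun h => h c1), getN_setN]
            by_cases ht : t' = turn - 1
            · subst ht
              rw [if_pos ⟨rfl, rfl, rfl, by omega, by rw [hm2]; exact hi', by rw [hm3]; exact hj'⟩,
                if_pos ⟨rfl, rfl⟩, if_neg (fun h => by omega), if_pos ⟨rfl, c2⟩, Option.getD_some]
            · rw [if_neg (fun h => ht h.1), if_pos ⟨rfl, rfl⟩, if_neg (fun h => h.2 c1),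
                if_neg (fun h => ht h.1), Option.getD_none]
          · -- write at turn+1 only
            rw [if_neg (fun h => h c2), if_pos c1, getN_setN]
            by_cases ht : t' = turn + 1
            · subst ht
              rw [if_pos ⟨rfl, rfl, rfl, by omega, by rw [hm2]; exact hi', by rw [hm3]; exact hj'⟩,
                if_pos ⟨rfl, rfl⟩, if_pos ⟨rfl, c1⟩, Option.getD_some]
            · rw [if_neg (fun h => ht h.1), if_pos ⟨rfl, rfl⟩, if_neg (fun h => ht h.1),
                if_neg (fun h => h.2 c2), Option.getD_none]
          · -- both writes
            rw [if_pos c2, if_pos c1, getN_setN]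
            by_cases ht : t' = turn - 1
            · subst ht
              rw [if_pos ⟨rfl, rfl, rfl, by rw [hs2.1]; omega,
                  by rw [hs2.2.1]; exact hi', by rw [hs2.2.2]; exact hj'⟩,
                if_pos ⟨rfl, rfl⟩, if_neg (fun h => by omega), if_pos ⟨rfl, c2⟩, Option.getD_some]
            · rw [if_neg (fun h => ht h.1), getN_setN]
              by_cases ht2 : t' = turn + 1
              · subst ht2
                rw [if_pos ⟨rfl, rfl, rfl, by omega, by rw [hm2]; exact hi', by rw [hm3]; exact hj'⟩,
                  if_pos ⟨rfl, rfl⟩, if_pos ⟨rfl, c1⟩, Option.getD_some]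
              · rw [if_neg (fun h => ht2 h.1), if_pos ⟨rfl, rfl⟩, if_neg (fun h => ht2 h.1),
                  if_neg (fun h => ht h.1), Option.getD_none]
        · rw [if_neg heq]
          split_ifs <;> simp only [getN_setN] <;> (repeat rw [if_neg (by tauto)])
      · have hC' : ¬ (getN map turn i j = "Q" ∧ 0 < turn ∧ ((turn : Int)+1 < nt)) := by
          intro h; exact hC ⟨h.1, h.2.2, h.2.1⟩
        simp only [if_neg hC, if_neg hC', Option.getD_none, ite_self]

theorem shapeOk_rowFold (map m : List (List (List String))) (nt : Int) (turn i : Nat)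
    (row : List String) (j0 : Nat) (hsh : shapeOk m map) :
    shapeOk ((row.zipIdx j0).foldl (fun m pc => stepCell map nt turn i pc.2 pc.1 m) m) map := by
  induction row generalizing j0 m with
  | nil => exact hsh
  | cons c row ih =>
    rw [List.zipIdx_cons, List.foldl_cons]
    exact ih _ _ (shapeOk_stepCell _ _ _ _ _ _ _ hsh)

theorem getN_rowFold (map m : List (List (List String))) (nt : Int) (turn i : Nat)
    (row : List String) (j0 : Nat) (t' i' j' : Nat)
    (hrow : ∀ (k : Nat) (hk : k < row.length), row[k] = getN map turn i (j0 + k))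
    (hsh : shapeOk m map)
    (hturnlt : turn < map.length) (hisrc : i < (map.getD turn []).length)
    (hrlen : j0 + row.length ≤ ((map.getD turn []).getD i []).length)
    (ht' : t' < map.length) (hi' : i' < (map.getD t' []).length)
    (hj' : j' < ((map.getD t' []).getD i' []).length) :
    getN ((row.zipIdx j0).foldl (fun m pc => stepCell map nt turn i pc.2 pc.1 m) m) t' i' j' =
      if i' = i ∧ j0 ≤ j' ∧ j' < j0 + row.length
      then (writerW map nt turn t' i j').getD (getN m t' i' j')
      else getN m t' i' j' := by
  induction row generalizing j0 m with
  | nil => rw [if_neg (by rintro ⟨-, h1, h2⟩; simp at h2; omega)]; rfl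
  | cons c row ih =>
    rw [List.zipIdx_cons, List.foldl_cons]
    have hcell : c = getN map turn i j0 := by
      have := hrow 0 (by simp)
      simpa using this
    have hrow' : ∀ (k : Nat) (hk : k < row.length), row[k] = getN map turn i ((j0+1) + k) := by
      intro k hk
      have := hrow (k+1) (by simp; omega)
      simpa [Nat.add_assoc, Nat.add_comm 1 k] using this
    have hrlen1 : j0 + 1 + row.length ≤ ((map.getD turn []).getD i []).length := by
      simp only [List.length_cons] at hrlen; omega
    rw [ih _ _ hrow' (shapeOk_stepCell _ _ _ _ _ _ _ hsh) hrlen1]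
    have hstep := getN_stepCell map m nt turn i j0 t' i' j' c hcell hsh hturnlt hisrc
      (by simp only [List.length_cons] at hrlen; omega) ht' hi' hj'
    rw [hstep]
    by_cases hB : i' = i ∧ j' = j0
    · obtain ⟨rfl, rfl⟩ := hB
      rw [if_neg (by rintro ⟨-, h1, -⟩; omega), if_pos ⟨rfl, rfl⟩,
        if_pos ⟨rfl, le_refl _, by simp only [List.length_cons]; omega⟩]
    · by_cases hA : i' = i ∧ j0 + 1 ≤ j' ∧ j' < (j0 + 1) + row.length
      · obtain ⟨rfl, h1, h2⟩ := hA
        rw [if_pos ⟨rfl, h1, h2⟩, if_neg hB, if_pos ⟨rfl, by omega, by simp only [List.length_cons]; omega⟩]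
      · rw [if_neg hA, if_neg hB, if_neg ?_]
        rintro ⟨rfl, h1, h2⟩
        simp only [List.length_cons] at h2
        rcases Nat.eq_or_lt_of_le h1 with h | h
        · exact hB ⟨rfl, h.symm⟩
        · exact hA ⟨rfl, by omega, by omega⟩

theorem shapeOk_obsFold (map m : List (List (List String))) (nt : Int) (turn : Nat)
    (obs : List (List String)) (i0 : Nat) (hsh : shapeOk m map) :
    shapeOk ((obs.zipIdx i0).foldl
      (fun m pr => (pr.1.zipIdx).foldl (fun m pc => stepCell map nt turn pr.2 pc.2 pc.1 m) m) m) map := by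
  induction obs generalizing i0 m with
  | nil => exact hsh
  | cons row obs ih =>
    rw [List.zipIdx_cons, List.foldl_cons]
    exact ih _ _ (shapeOk_rowFold _ _ _ _ _ _ _ hsh)

theorem getN_obsFold (map m : List (List (List String))) (nt : Int) (turn : Nat)
    (obs : List (List String)) (i0 : Nat) (t' i' j' : Nat)
    (hobs : ∀ (k : Nat) (hk : k < obs.length), obs[k] = (map.getD turn []).getD (i0 + k) [])
    (hsh : shapeOk m map)
    (hturnlt : turn < map.length)
    (holen : i0 + obs.length ≤ (map.getD turn []).length)
    (ht' : t' < map.length) (hi' : i' < (map.getD t' []).length)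
    (hj' : j' < ((map.getD t' []).getD i' []).length) :
    getN ((obs.zipIdx i0).foldl
      (fun m pr => (pr.1.zipIdx).foldl (fun m pc => stepCell map nt turn pr.2 pc.2 pc.1 m) m) m) t' i' j' =
      if i0 ≤ i' ∧ i' < i0 + obs.length
      then (writerW map nt turn t' i' j').getD (getN m t' i' j')
      else getN m t' i' j' := by
  induction obs generalizing i0 m with
  | nil => rw [if_neg (by rintro ⟨h1, h2⟩; simp at h2; omega)]; rfl
  | cons row obs ih =>
    rw [List.zipIdx_cons, List.foldl_cons]
    have hrow0 : row = (map.getD turn []).getD i0 [] := by simpa using hobs 0 (by simp)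
    have hobs' : ∀ (k : Nat) (hk : k < obs.length), obs[k] = (map.getD turn []).getD ((i0+1) + k) [] := by
      intro k hk
      have := hobs (k+1) (by simp; omega)
      simpa [Nat.add_assoc, Nat.add_comm 1 k] using this
    have holen' : (i0+1) + obs.length ≤ (map.getD turn []).length := by
      simp only [List.length_cons] at holen; omega
    have hisrc : i0 < (map.getD turn []).length := by
      simp only [List.length_cons] at holen; omega
    have hrowlen : row.length = ((map.getD turn []).getD i0 []).length := by rw [hrow0]
    rw [ih _ _ hobs' (shapeOk_rowFold _ _ _ _ _ _ _ hsh) holen']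
    have hrow : ∀ (k : Nat) (hk : k < row.length), row[k] = getN map turn i0 (0 + k) := by
      intro k hk
      rw [List.getElem_eq_getD (fallback := "")]
      unfold getN
      rw [← hrow0, Nat.zero_add]
    have hfold := getN_rowFold map m nt turn i0 row 0 t' i' j' hrow hsh hturnlt hisrc
      (by omega) ht' hi' hj'
    rw [hfold]
    by_cases hB : i' = i0
    · subst hB
      by_cases hjr : j' < row.length
      · rw [if_neg (by rintro ⟨h1, -⟩; omega), if_pos ⟨rfl, Nat.zero_le _, by omega⟩,
          if_pos ⟨le_refl _, by simp only [List.length_cons]; omega⟩]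
      · have hw : writerW map nt turn t' i' j' = none := by
          apply writerW_oob
          rintro ⟨-, -, hc⟩
          exact hjr (by omega)
        rw [if_neg (by rintro ⟨h1, -⟩; omega), if_neg (by rintro ⟨-, -, h2⟩; omega),
          if_pos ⟨le_refl _, by simp only [List.length_cons]; omega⟩, hw, Option.getD_none]
    · by_cases hA : i0 + 1 ≤ i' ∧ i' < (i0 + 1) + obs.length
      · rw [if_pos hA, if_neg (fun h => hB h.1), if_pos ⟨by omega, by simp only [List.length_cons]; omega⟩]
      · rw [if_neg hA, if_neg (fun h => hB h.1), if_neg ?_]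
        rintro ⟨h1, h2⟩
        simp only [List.length_cons] at h2
        rcases Nat.eq_or_lt_of_le h1 with h | h
        · exact hB h.symm
        · exact hA ⟨by omega, by omega⟩

def segScan (map : List (List (List String))) (nt : Int) (t i j : Nat) (s0 : Nat) : Nat → Option String
  | 0 => none
  | n+1 =>
    match writerW map nt (s0+n) t i j with
    | some w => some w
    | none => segScan map nt t i j s0 n

theorem segScan_shift (map : List (List (List String))) (nt : Int) (t i j s0 n : Nat) :
    segScan map nt t i j s0 (n+1) =
      match segScan map nt t i j (s0+1) n with
      | some w => some w
      | none => writerW map nt s0 t i j := by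
  induction n generalizing s0 with
  | zero =>
    simp only [segScan, Nat.add_zero]
    cases writerW map nt s0 t i j <;> rfl
  | succ n ih =>
    have h1 : segScan map nt t i j s0 (n+2) =
        match writerW map nt (s0+(n+1)) t i j with
        | some w => some w
        | none => segScan map nt t i j s0 (n+1) := rfl
    have h2 : segScan map nt t i j (s0+1) (n+1) =
        match writerW map nt ((s0+1)+n) t i j with
        | some w => some w
        | none => segScan map nt t i j (s0+1) n := rfl
    rw [h1, h2, ih s0, show s0 + (n+1) = (s0+1)+n by omega]
    cases writerW map nt ((s0+1)+n) t i j <;> cases segScan map nt t i j (s0+1) n <;> simp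

theorem scanW_eq_segScan (map : List (List (List String))) (nt : Int) (t i j n : Nat) :
    scanW map nt t i j n = segScan map nt t i j 0 n := by
  induction n with
  | zero => rfl
  | succ n ih =>
    simp only [scanW, segScan, Nat.zero_add]
    rw [ih]

theorem shapeOk_turnsFold (map m : List (List (List String))) (nt : Int)
    (ms : List (List (List String))) (s0 : Nat) (hsh : shapeOk m map) :
    shapeOk ((ms.zipIdx s0).foldl (fun m po =>
      (po.1.zipIdx).foldl (fun m pr =>
        (pr.1.zipIdx).foldl (fun m pc => stepCell map nt po.2 pr.2 pc.2 pc.1 m) m) m) m) map := by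
  induction ms generalizing s0 m with
  | nil => exact hsh
  | cons obs ms ih =>
    rw [List.zipIdx_cons, List.foldl_cons]
    exact ih _ _ (shapeOk_obsFold _ _ _ _ _ _ hsh)

theorem getN_turnsFold (map m : List (List (List String))) (nt : Int)
    (ms : List (List (List String))) (s0 : Nat) (t' i' j' : Nat)
    (hms : ∀ (k : Nat) (hk : k < ms.length), ms[k] = map.getD (s0 + k) [])
    (hlen : s0 + ms.length ≤ map.length)
    (hsh : shapeOk m map)
    (ht' : t' < map.length) (hi' : i' < (map.getD t' []).length)
    (hj' : j' < ((map.getD t' []).getD i' []).length) :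
    getN ((ms.zipIdx s0).foldl (fun m po =>
      (po.1.zipIdx).foldl (fun m pr =>
        (pr.1.zipIdx).foldl (fun m pc => stepCell map nt po.2 pr.2 pc.2 pc.1 m) m) m) m) t' i' j' =
      (segScan map nt t' i' j' s0 ms.length).getD (getN m t' i' j') := by
  induction ms generalizing s0 m with
  | nil => rfl
  | cons obs ms ih =>
    rw [List.zipIdx_cons, List.foldl_cons]
    have hobs0 : obs = map.getD s0 [] := by simpa using hms 0 (by simp)
    have hs0lt : s0 < map.length := by simp at hlen; omega
    have hms' : ∀ (k : Nat) (hk : k < ms.length), ms[k] = map.getD ((s0+1) + k) [] := by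
      intro k hk
      have := hms (k+1) (by simp; omega)
      simpa [Nat.add_assoc, Nat.add_comm 1 k] using this
    have hlen' : (s0+1) + ms.length ≤ map.length := by simp at hlen ⊢; omega
    have hobs : ∀ (k : Nat) (hk : k < obs.length), obs[k] = (map.getD s0 []).getD (0 + k) [] := by
      intro k hk
      rw [List.getElem_eq_getD (fallback := []), ← hobs0, Nat.zero_add]
    have holeneq : obs.length = (map.getD s0 []).length := congrArg List.length hobs0
    have hfold := getN_obsFold map m nt s0 obs 0 t' i' j' hobs hsh hs0lt (by omega) ht' hi' hj'
    rw [ih _ _ hms' hlen' (shapeOk_obsFold _ _ _ _ _ _ hsh), hfold]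
    rw [show (obs :: ms).length = ms.length + 1 from rfl, segScan_shift]
    by_cases hio : i' < obs.length
    · rw [if_pos ⟨Nat.zero_le _, by omega⟩]
      cases segScan map nt t' i' j' (s0+1) ms.length <;>
        cases writerW map nt s0 t' i' j' <;> simp
    · have hw : writerW map nt s0 t' i' j' = none := by
        apply writerW_oob
        rintro ⟨-, h2, -⟩
        exact hio (by omega)
      rw [if_neg (by rintro ⟨-, h2⟩; omega), hw]
      cases segScan map nt t' i' j' (s0+1) ms.length <;> simp

theorem getN_eq_getElem (L : List (List (List String))) (t i j : Nat)
    (h1 : t < L.length) (h2 : i < L[t].length) (h3 : j < L[t][i].length) :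
    getN L t i j = L[t][i][j] := by
  unfold getN
  rw [List.getD_eq_getElem L [] h1, List.getD_eq_getElem _ [] h2, List.getD_eq_getElem _ "" h3]

theorem update_observations_spec' (map : List (List (List String))) (nt : Int) :
    update_observations map nt = update_observations_alt map nt := by
  have hms : ∀ (k : Nat) (hk : k < map.length), map[k] = map.getD (0 + k) [] := by
    intro k hk
    rw [Nat.zero_add, List.getD_eq_getElem map [] hk]
  have hA : update_observations map nt =
      (map.zipIdx).foldl (fun m po =>
        (po.1.zipIdx).foldl (fun m pr =>
          (pr.1.zipIdx).foldl (fun m pc => stepCell map nt po.2 pr.2 pc.2 pc.1 m) m) m) map := by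
    unfold update_observations
    have : map.map (fun obs => obs.map (fun row => row.map (fun c => c))) = map := by
      simp
    rw [this]
  have hshA : shapeOk (update_observations map nt) map := by
    rw [hA]
    exact shapeOk_turnsFold map map nt map 0 (shapeOk_refl map)
  have hcell : ∀ (t i j : Nat), t < map.length → i < (map.getD t []).length →
      j < ((map.getD t []).getD i []).length →
      getN (update_observations map nt) t i j =
        (scanW map nt t i j map.length).getD (getN map t i j) := by
    intro t i j h1 h2 h3
    rw [hA, getN_turnsFold map map nt map 0 t i j hms (by omega)
      (shapeOk_refl map) h1 h2 h3, scanW_eq_segScan]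
  have hBlen : (update_observations_alt map nt).length = map.length := by
    simp [update_observations_alt]
  have hAlen : (update_observations map nt).length = map.length := hshA.1
  apply List.ext_getElem (by rw [hAlen, hBlen])
  intro t ht htB
  have htm : t < map.length := by rw [hAlen] at ht; exact ht
  have hBt : (update_observations_alt map nt)[t]'htB =
      ((map[t]'htm).zipIdx).map (fun pr =>
        (pr.1.zipIdx).map (fun pc =>
          (scanW map nt t pr.2 pc.2 map.length).getD pc.1)) := by
    simp [update_observations_alt]
  have hAtlen : (update_observations map nt)[t].length = (map[t]'htm).length := by
    have := hshA.2.1 t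
    rw [List.getD_eq_getElem _ [] ht, List.getD_eq_getElem map [] htm] at this
    exact this
  apply List.ext_getElem (by rw [hAtlen, hBt]; simp)
  intro i hi hiB
  have him : i < (map[t]'htm).length := by rw [hAtlen] at hi; exact hi
  have hBti : (update_observations_alt map nt)[t][i]'hiB =
      (((map[t]'htm)[i]'him).zipIdx).map (fun pc =>
        (scanW map nt t i pc.2 map.length).getD pc.1) := by
    simp [update_observations_alt]
  have hAtilen : (update_observations map nt)[t][i].length = ((map[t]'htm)[i]'him).length := by
    have := hshA.2.2 t i
    rw [List.getD_eq_getElem _ [] ht, List.getD_eq_getElem _ [] hi,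
      List.getD_eq_getElem map [] htm, List.getD_eq_getElem _ [] him] at this
    exact this
  apply List.ext_getElem (by rw [hAtilen, hBti]; simp)
  intro j hj hjB
  have hjm : j < ((map[t]'htm)[i]'him).length := by rw [hAtilen] at hj; exact hj
  have hBval : (update_observations_alt map nt)[t][i][j]'hjB =
      (scanW map nt t i j map.length).getD (((map[t]'htm)[i]'him)[j]'hjm) := by
    simp [update_observations_alt]
  have h2' : i < (map.getD t []).length := by rw [List.getD_eq_getElem map [] htm]; exact him
  have h3' : j < ((map.getD t []).getD i []).length := by
    rw [List.getD_eq_getElem map [] htm, List.getD_eq_getElem _ [] him]; exact hjm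
  have hAval : (update_observations map nt)[t][i][j]'hj =
      (scanW map nt t i j map.length).getD (getN map t i j) := by
    rw [← getN_eq_getElem _ t i j ht hi hj]
    exact hcell t i j htm h2' h3'
  rw [hAval, hBval, getN_eq_getElem map t i j htm him hjm]

-- ===== VERDICT (by name: the statement is the Claim_ definition above) =====
theorem update_observations_spec : Claim_equal_update_observations := by
  intro map nt _hdom _hpre
  unfold Spec_update_observations
  exact update_observations_spec' map nt
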